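-- pv_equiv track=rewrite | github.com/SLI0124/metody-analyzy-siti-ii | tasks/task01.py | create_protein_dict
-- ===== SOURCE A (Python) =====
-- def create_protein_dict(lines):
--     """Convert protein string IDs to numeric IDs for consistent processing"""
--     protein_to_id = {}
--     mapped_edges = []
--     current_id = 1
--
--     # Map each unique protein string to a numeric ID
--     for pair in lines:
--         src, dst = pair
--         if src not in protein_to_id:
--             protein_to_id[src] = current_id
--             current_id += 1
--         if dst not in protein_to_id:
--             protein_to_id[dst] = current_id
--             current_id += 1
--         mapped_edges.append([protein_to_id[src], protein_to_id[dst]])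
--
--     # Create reverse mapping (ID -> protein string) for later use
--     id_to_protein = [""] * len(protein_to_id)
--     for protein, idx in protein_to_id.items():
--         id_to_protein[idx - 1] = protein
--
--     return mapped_edges, id_to_protein
-- ===== SOURCE B (Python) =====
-- def create_protein_dict(lines):
--     """Convert protein string IDs to numeric IDs for consistent processing"""
--     # Index of the first occurrence of each protein in the flattened edge stream:
--     # filling the dict from the reversed stream lets earlier occurrences overwrite later ones.
--     stream = [p for pair in lines for p in pair]
--     first_pos = {p: i for i, p in reversed(list(enumerate(stream)))}
--     # The numbering is the rank by first occurrence: sort distinct proteins by that index.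
--     id_to_protein = sorted(first_pos, key=first_pos.get)
--     protein_to_id = {p: i for i, p in enumerate(id_to_protein, 1)}
--     mapped_edges = [[protein_to_id[src], protein_to_id[dst]] for src, dst in lines]
--     return mapped_edges, id_to_protein
-- ===== Notes on version B (the rewrite author's own statement) =====
-- stated objective: alternative
-- what changed: B replaces A's incremental first-seen numbering (mutable id counter, conditional inserts per edge, then a pre-allocate-and-place loop) by a rank-by-first-occurrence computation: flatten the edges to a stream, build a first-occurrence-index dict by overwriting inserts over the reversed enumerated stream, SORT the distinct proteins by that index to get id_to_protein, and remap edges through the dict derived from the sorted list.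
import Mathlib
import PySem

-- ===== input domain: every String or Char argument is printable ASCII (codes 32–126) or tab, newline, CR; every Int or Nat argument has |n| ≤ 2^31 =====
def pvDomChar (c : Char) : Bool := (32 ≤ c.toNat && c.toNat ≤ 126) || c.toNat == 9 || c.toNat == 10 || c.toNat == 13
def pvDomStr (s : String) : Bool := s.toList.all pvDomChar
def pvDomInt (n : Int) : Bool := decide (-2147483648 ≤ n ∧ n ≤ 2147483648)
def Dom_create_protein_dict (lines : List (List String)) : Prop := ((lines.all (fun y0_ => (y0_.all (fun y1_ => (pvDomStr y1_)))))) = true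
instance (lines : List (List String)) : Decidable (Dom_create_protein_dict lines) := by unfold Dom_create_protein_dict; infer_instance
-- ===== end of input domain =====

-- B computes the numbering as a rank-by-first-occurrence: it builds a first-occurrence-index dict
-- from the reversed enumerated flattened stream and SORTS the distinct proteins by that index,
-- instead of A's incremental id counter with conditional inserts and a place-by-index loop
-- (objective: alternative; same return value).


-- ===== PORT A =====
-- one loop iteration of A: unpack the pair, give fresh ids to unseen src/dst, append the mapped edge
-- (under Pre_ every pair is [src, dst]; 'getD _ 0' is exact because both keys are present at lookup time)
def pvAStep (st : PySem.Dict String Int × Int × List (List Int)) (pair : List String) :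
    PySem.Dict String Int × Int × List (List Int) :=
  match pair with
  | [src, dst] =>
    let (d, c, edges) := st
    let (d, c) := if d.contains src then (d, c) else (d.insert src c, c + 1)
    let (d, c) := if d.contains dst then (d, c) else (d.insert dst c, c + 1)
    (d, c, edges ++ [[d.getD src 0, d.getD dst 0]])
  | _ => st  -- Python raises ValueError on 'src, dst = pair'; excluded by Pre_

def create_protein_dict (lines : List (List String)) : List (List Int) × List String :=
  let (d, _, edges) := lines.foldl pvAStep (PySem.Dict.empty, 1, [])
  -- id_to_protein = [""] * len(protein_to_id), then id_to_protein[idx - 1] = protein for each item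
  -- ('pySetD' is exact here: every stored id lies in 1..len, so idx - 1 is always in range)
  let id_to_protein := d.items.foldl (fun r p => PySem.List.pySetD r (p.2 - 1) p.1)
      (List.replicate d.size "")
  (edges, id_to_protein)

-- ===== PORT B =====
-- B's edge comprehension body: one edge remapped through the finished numbering
-- ('getD _ 0' is exact: both proteins occur in the stream, so both keys are present)
def pvMapEdge (d : PySem.Dict String Int) (pair : List String) : List Int :=
  match pair with
  | [src, dst] => [d.getD src 0, d.getD dst 0]
  | _ => []  -- Python raises ValueError on unpack; excluded by Pre_

def create_protein_dict_alt (lines : List (List String)) : List (List Int) × List String :=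
  -- stream = [p for pair in lines for p in pair]
  let stream := lines.flatMap (fun pair => pair)
  -- first_pos = {p: i for i, p in reversed(list(enumerate(stream)))}
  let first_pos := ((PySem.List.enumerate stream).reverse).foldl
      (fun d q => d.insert q.2 q.1) (PySem.Dict.empty : PySem.Dict String Int)
  -- id_to_protein = sorted(first_pos, key=first_pos.get); iterating a dict yields its keys in
  -- insertion order, and 'getD _ 0' is exact for the key function since every key is present
  let id_to_protein := PySem.List.sorted first_pos.keys (fun p => first_pos.getD p 0)
  -- protein_to_id = {p: i for i, p in enumerate(id_to_protein, 1)}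
  let protein_to_id := (PySem.List.enumerate id_to_protein 1).foldl
      (fun d q => d.insert q.2 q.1) (PySem.Dict.empty : PySem.Dict String Int)
  (lines.map (pvMapEdge protein_to_id), id_to_protein)

-- ===== PRECONDITION & SPEC =====
-- Pre_ excludes exactly the rows on which Python's 'src, dst = pair' raises ValueError (length ≠ 2).
def Pre_create_protein_dict (lines : List (List String)) : Prop :=
  ∀ pair ∈ lines, pair.length = 2
instance (lines : List (List String)) : Decidable (Pre_create_protein_dict lines) := by
  unfold Pre_create_protein_dict; infer_instance

def pvWitness_create_protein_dict : List (List String) := [["a", "b"], ["b", "c"], ["a", "a"]]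

def Spec_create_protein_dict (lines : List (List String)) (out : List (List Int) × List String) : Prop := out = create_protein_dict_alt lines
instance (lines : List (List String)) (out : List (List Int) × List String) : Decidable (Spec_create_protein_dict lines out) := by unfold Spec_create_protein_dict; infer_instance

-- ===== CLAIM (what is proved, stated in full; the proofs are below) =====
def Claim_equal_create_protein_dict : Prop := ∀ (lines : List (List String)), Dom_create_protein_dict lines → Pre_create_protein_dict lines → Spec_create_protein_dict lines (create_protein_dict lines)

-- ===== LEMMAS AND PROOFS =====

-- ghost fold (proof device only): the first-seen numbering pass both programs implicitly share —
-- A runs it interleaved with edge building, B reconstructs its result by sorting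
def pvGhost (st : PySem.Dict String Int × List String) (pair : List String) :
    PySem.Dict String Int × List String :=
  match pair with
  | [src, dst] =>
    let (d, r) := st
    let (d, r) := if d.contains src then (d, r) else (d.insert src ((r.length : Int) + 1), r ++ [src])
    let (d, r) := if d.contains dst then (d, r) else (d.insert dst ((r.length : Int) + 1), r ++ [dst])
    (d, r)
  | _ => st

-- coupling invariant: the dict holds exactly the proteins of the reverse list, in order, ids 1..n
def pvInv (d : PySem.Dict String Int) (r : List String) : Prop :=
  d.items = (PySem.List.enumerate r 1).map (fun q => (q.2, q.1))

lemma pvInv_insert {d : PySem.Dict String Int} {r : List String} (h : pvInv d r) (k : String)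
    (hk : d.contains k = false) :
    pvInv (d.insert k ((r.length : Int) + 1)) (r ++ [k]) := by
  unfold pvInv
  rw [PySem.Dict.items_insert_of_not_contains _ _ hk, h, PySem.List.enumerate_append,
    List.map_append]
  simp [PySem.List.enumerate_cons, PySem.List.enumerate_nil, add_comm]

lemma pvInv_contains {d : PySem.Dict String Int} {r : List String} (h : pvInv d r) (p : String) :
    d.contains p = r.contains p := by
  unfold pvInv at h
  have hkeys : d.keys = r := by
    simp only [PySem.Dict.keys, h, List.map_map, Function.comp_def]
    exact PySem.List.map_snd_enumerate r 1
  rw [Bool.eq_iff_iff, PySem.Dict.contains_iff_mem_keys, hkeys, List.contains_iff_mem]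

-- one guarded insert of the ghost pass: lookup/membership of an already-present key survive
lemma pvSub1 (d : PySem.Dict String Int) (r : List String) (k x : String)
    (hk : d.contains k = true) :
    ((if d.contains x then (d, r) else (d.insert x ((r.length : Int) + 1), r ++ [x])).1.getD k 0 = d.getD k 0)
    ∧ ((if d.contains x then (d, r) else (d.insert x ((r.length : Int) + 1), r ++ [x])).1.contains k = true) := by
  by_cases hx : d.contains x = true
  · simp [hx, hk]
  · simp only [Bool.not_eq_true] at hx
    have hne : k ≠ x := fun he => by rw [he] at hk; rw [hk] at hx; cases hx
    simp [hx, PySem.Dict.getD_insert_of_ne _ _ _ hne, PySem.Dict.contains_insert, hk]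

-- the ghost pass never overwrites: lookups of already-present keys are stable over the fold
lemma pvStable (lines : List (List String)) (d : PySem.Dict String Int) (r : List String)
    (k : String) (hk : d.contains k = true) :
    ((lines.foldl pvGhost (d, r)).1.getD k 0 = d.getD k 0)
    ∧ ((lines.foldl pvGhost (d, r)).1.contains k = true) := by
  induction lines generalizing d r with
  | nil => simp [hk]
  | cons pair rest ih =>
    rcases pair with _ | ⟨s, _ | ⟨t, _ | ⟨u, tl⟩⟩⟩
    · simpa [pvGhost] using ih d r hk
    · simpa [pvGhost] using ih d r hk
    · simp only [List.foldl_cons, pvGhost]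
      obtain ⟨h1, h2⟩ := pvSub1 d r k s hk
      set st1 := (if d.contains s then (d, r) else (d.insert s ((r.length : Int) + 1), r ++ [s])) with hst1
      obtain ⟨h3, h4⟩ := pvSub1 st1.1 st1.2 k t h2
      obtain ⟨h5, h6⟩ := ih _ _ h4
      constructor
      · rw [h5, h3, h1]
      · exact h6
    · simpa [pvGhost] using ih d r hk

-- the invariant survives the whole ghost pass
lemma pvInvFold (lines : List (List String)) (d : PySem.Dict String Int) (r : List String)
    (hinv : pvInv d r) :
    pvInv (lines.foldl pvGhost (d, r)).1 (lines.foldl pvGhost (d, r)).2 := by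
  induction lines generalizing d r with
  | nil => simpa
  | cons pair rest ih =>
    rcases pair with _ | ⟨s, _ | ⟨t, _ | ⟨u, tl⟩⟩⟩
    · simpa [pvGhost] using ih d r hinv
    · simpa [pvGhost] using ih d r hinv
    · simp only [List.foldl_cons, pvGhost]
      have hinv1 : ∀ st1 : PySem.Dict String Int × List String,
          st1 = (if d.contains s then (d, r) else (d.insert s ((r.length : Int) + 1), r ++ [s])) →
          pvInv st1.1 st1.2 := by
        rintro st1 rfl
        by_cases hs : d.contains s = true
        · simpa [hs]
        · simp only [Bool.not_eq_true] at hs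
          simpa [hs] using pvInv_insert hinv s hs
      set st1 := (if d.contains s then (d, r) else (d.insert s ((r.length : Int) + 1), r ++ [s])) with hst1
      have h1 := hinv1 st1 hst1
      by_cases ht : st1.1.contains t = true
      · simpa [ht] using ih _ _ h1
      · simp only [Bool.not_eq_true] at ht
        simpa [ht] using ih _ _ (pvInv_insert h1 t ht)
    · simpa [pvGhost] using ih d r hinv

-- one loop iteration: A's step is the ghost step plus the edge mapped through the post-step dict
lemma pvStepEq (d : PySem.Dict String Int) (r : List String) (edges : List (List Int)) (s t : String)
    (hinv : pvInv d r) :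
    (pvAStep (d, (r.length : Int) + 1, edges) [s, t]
      = ((pvGhost (d, r) [s, t]).1, (((pvGhost (d, r) [s, t]).2.length : Int) + 1),
         edges ++ [pvMapEdge (pvGhost (d, r) [s, t]).1 [s, t]]))
    ∧ pvInv (pvGhost (d, r) [s, t]).1 (pvGhost (d, r) [s, t]).2
    ∧ (pvGhost (d, r) [s, t]).1.contains s = true
    ∧ (pvGhost (d, r) [s, t]).1.contains t = true := by
  simp only [pvAStep, pvGhost, pvMapEdge]
  by_cases hs : d.contains s = true
  · by_cases ht : d.contains t = true
    · simp [hs, ht]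
      exact hinv
    · simp only [Bool.not_eq_true] at ht
      have hinv2 := pvInv_insert hinv t ht
      simp [hs, ht, PySem.Dict.contains_insert]
      exact hinv2
  · simp only [Bool.not_eq_true] at hs
    have hinv1 := pvInv_insert hinv s hs
    by_cases ht : (d.insert s ((r.length : Int) + 1)).contains t = true
    · simp [hs, ht, PySem.Dict.contains_insert_self]
      exact hinv1
    · simp only [Bool.not_eq_true] at ht
      have hinv2 := pvInv_insert hinv1 t ht
      simp [hs, ht, PySem.Dict.contains_insert]
      exact ⟨by ring, by simpa using hinv2⟩

-- main A-side correspondence: A's fold is the ghost fold plus all edges mapped through the final dict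
lemma pvMain (lines : List (List String)) (hpre : ∀ pair ∈ lines, pair.length = 2)
    (d : PySem.Dict String Int) (r : List String) (edges : List (List Int)) (hinv : pvInv d r) :
    lines.foldl pvAStep (d, (r.length : Int) + 1, edges)
      = ((lines.foldl pvGhost (d, r)).1,
         (((lines.foldl pvGhost (d, r)).2.length : Int) + 1),
         edges ++ lines.map (pvMapEdge (lines.foldl pvGhost (d, r)).1)) := by
  induction lines generalizing d r edges with
  | nil => simp
  | cons pair rest ih =>
    have hlen : pair.length = 2 := hpre pair (List.mem_cons_self)
    rcases pair with _ | ⟨s, _ | ⟨t, _ | ⟨u, tl⟩⟩⟩ <;> simp at hlen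
    have hpre' : ∀ p ∈ rest, p.length = 2 := fun p hp => hpre p (List.mem_cons_of_mem _ hp)
    obtain ⟨heq, hinv2, hs2, ht2⟩ := pvStepEq d r edges s t hinv
    simp only [List.foldl_cons, List.map_cons, heq]
    have hmk : (pvGhost (d, r) [s, t]) = ((pvGhost (d, r) [s, t]).1, (pvGhost (d, r) [s, t]).2) := rfl
    rw [hmk]
    rw [ih hpre' _ _ _ hinv2]
    obtain ⟨hgs, _⟩ := pvStable rest (pvGhost (d, r) [s, t]).1 (pvGhost (d, r) [s, t]).2 s hs2
    obtain ⟨hgt, _⟩ := pvStable rest (pvGhost (d, r) [s, t]).1 (pvGhost (d, r) [s, t]).2 t ht2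
    simp only [pvMapEdge, hgs, hgt, List.append_assoc, List.singleton_append]

-- A's placement loop over the items of an invariant-shaped dict rebuilds exactly the ghost list
lemma pvPlace (r : List String) (j : Nat) (acc : List String) (hlen : acc.length = j + r.length) :
    ((PySem.List.enumerate r ((j : Int) + 1)).map (fun q => (q.2, q.1))).foldl
        (fun a p => PySem.List.pySetD a (p.2 - 1) p.1) acc
      = acc.take j ++ r := by
  induction r generalizing j acc with
  | nil =>
    simp at hlen
    simp [PySem.List.enumerate_nil, List.take_of_length_le (le_of_eq hlen)]
  | cons k r ih =>
    simp only [PySem.List.enumerate_cons, List.map_cons, List.foldl_cons]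
    have hset : PySem.List.pySetD acc (((j : Int) + 1) - 1) k = acc.set j k := by
      have h1 : (((j : Int) + 1) - 1) = ((j : Nat) : Int) := by omega
      rw [h1, PySem.List.pySetD_natCast]
    rw [hset]
    have hj : j < acc.length := by simp [hlen]
    have harg : ((j : Int) + 1) + 1 = (((j + 1 : Nat) : Int) + 1) := by push_cast; ring
    rw [harg]
    have := ih (j + 1) (acc.set j k) (by simp [hlen]; omega)
    rw [this, List.set_eq_take_cons_drop k hj, List.take_append]
    simp [List.length_take, Nat.min_eq_left (le_of_lt hj)]

-- the ghost list is exactly set-of-stream in first-occurrence order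
lemma pvGhostSnd (lines : List (List String)) (hpre : ∀ pair ∈ lines, pair.length = 2)
    (d : PySem.Dict String Int) (r : List String) (hinv : pvInv d r) :
    (lines.foldl pvGhost (d, r)).2
      = (lines.flatMap (fun pair => pair)).foldl PySem.Set.add r := by
  induction lines generalizing d r with
  | nil => simp
  | cons pair rest ih =>
    have hlen : pair.length = 2 := hpre pair (List.mem_cons_self)
    rcases pair with _ | ⟨s, _ | ⟨t, _ | ⟨u, tl⟩⟩⟩ <;> simp at hlen
    have hpre' : ∀ p ∈ rest, p.length = 2 := fun p hp => hpre p (List.mem_cons_of_mem _ hp)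
    obtain ⟨_, hinv2, _, _⟩ := pvStepEq d r [] s t hinv
    have hstep : (pvGhost (d, r) [s, t]).2 = PySem.Set.add (PySem.Set.add r s) t := by
      have hcs := pvInv_contains hinv s
      simp only [pvGhost]
      by_cases hs : r.contains s = true
      · have hds : d.contains s = true := by rw [hcs]; exact hs
        have hadd1 : PySem.Set.add r s = r := by
          show (if r.contains s then r else r ++ [s]) = r
          rw [if_pos hs]
        have hct := pvInv_contains hinv t
        rw [if_pos hds, hadd1]
        by_cases ht : r.contains t = true
        · have hdt : d.contains t = true := by rw [hct]; exact ht
          rw [if_pos hdt]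
          show r = if r.contains t then r else r ++ [t]
          rw [if_pos ht]
        · have hdt : ¬ d.contains t = true := by rw [hct]; exact ht
          rw [if_neg hdt]
          show r ++ [t] = if r.contains t then r else r ++ [t]
          rw [if_neg ht]
      · have hds : ¬ d.contains s = true := by rw [hcs]; exact hs
        have hdsf : d.contains s = false := by simpa using hds
        have hadd1 : PySem.Set.add r s = r ++ [s] := by
          show (if r.contains s then r else r ++ [s]) = r ++ [s]
          rw [if_neg hs]
        have hdinv : pvInv (d.insert s ((r.length : Int) + 1)) (r ++ [s]) :=
          pvInv_insert hinv s hdsf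
        have hct := pvInv_contains hdinv t
        rw [if_neg hds, hadd1]
        by_cases ht : (r ++ [s]).contains t = true
        · have hdt : (d.insert s ((r.length : Int) + 1)).contains t = true := by
            rw [hct]; exact ht
          rw [if_pos hdt]
          show r ++ [s] = if (r ++ [s]).contains t then r ++ [s] else (r ++ [s]) ++ [t]
          rw [if_pos ht]
        · have hdt : ¬ (d.insert s ((r.length : Int) + 1)).contains t = true := by
            rw [hct]; exact ht
          rw [if_neg hdt]
          show (r ++ [s]) ++ [t] = if (r ++ [s]).contains t then r ++ [s] else (r ++ [s]) ++ [t]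
          rw [if_neg ht]
    have hmk : (pvGhost (d, r) [s, t]) = ((pvGhost (d, r) [s, t]).1, (pvGhost (d, r) [s, t]).2) := rfl
    simp only [List.foldl_cons, List.flatMap_cons, List.cons_append, List.foldl_append,
      List.foldl_nil]
    rw [hmk, ih hpre' _ _ hinv2, hstep]

-- B's first_pos dict: lookup is the index of the FIRST occurrence in the stream
lemma pvFPget (xs : List String) (s : Int) (p : String) :
    (((PySem.List.enumerate xs s).reverse).foldl (fun d q => d.insert q.2 q.1)
        (PySem.Dict.empty : PySem.Dict String Int)).get? p
      = if p ∈ xs then some (s + (xs.idxOf p : Int)) else none := by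
  induction xs generalizing s with
  | nil => simp [PySem.List.enumerate_nil, PySem.Dict.get?_empty]
  | cons x xs ih =>
    simp only [PySem.List.enumerate_cons, List.reverse_cons, List.foldl_append, List.foldl_cons,
      List.foldl_nil]
    by_cases hpx : p = x
    · subst hpx
      rw [PySem.Dict.get?_insert_self]
      simp [List.idxOf_cons_self]
    · rw [PySem.Dict.get?_insert_of_ne _ _ hpx, ih (s + 1)]
      by_cases hm : p ∈ xs
      · have : p ∈ x :: xs := List.mem_cons_of_mem _ hm
        simp only [hm, if_true, this, if_true]
        rw [List.idxOf_cons_ne _ (fun h => hpx h.symm)]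
        push_cast
        ring_nf
      · have : ¬ p ∈ x :: xs := by simp [hpx, hm]
        simp [hm, this]

-- B's first_pos dict: its key set is the set of proteins of the stream
lemma pvFPmem (xs : List String) (p : String) :
    p ∈ (((PySem.List.enumerate xs).reverse).foldl (fun d q => d.insert q.2 q.1)
        (PySem.Dict.empty : PySem.Dict String Int)).keys ↔ p ∈ xs := by
  rw [← PySem.Dict.contains_iff_mem_keys, PySem.Dict.contains_eq_isSome_get?, pvFPget xs 0 p]
  by_cases hm : p ∈ xs <;> simp [hm]

-- first-occurrence indices strictly increase along the first-seen dedup order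
lemma pvPairwiseIdx (xs : List String) :
    (PySem.Set.ofList xs).Pairwise (fun a b => xs.idxOf a < xs.idxOf b) := by
  induction xs using List.reverseRecOn with
  | nil => simp
  | append_singleton xs x ih =>
    have hof : PySem.Set.ofList (xs ++ [x]) = PySem.Set.add (PySem.Set.ofList xs) x := by
      rw [PySem.Set.ofList_eq_foldl, PySem.Set.ofList_eq_foldl, List.foldl_append]
      simp
    rw [hof]
    have htrans : ∀ {a b : String}, a ∈ PySem.Set.ofList xs → b ∈ PySem.Set.ofList xs →
        xs.idxOf a < xs.idxOf b → (xs ++ [x]).idxOf a < (xs ++ [x]).idxOf b := by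
      intro a b ha hb hlt
      rw [List.idxOf_append_of_mem ((PySem.Set.mem_ofList xs a).mp ha),
        List.idxOf_append_of_mem ((PySem.Set.mem_ofList xs b).mp hb)]
      exact hlt
    by_cases hx : x ∈ PySem.Set.ofList xs
    · have hc : (PySem.Set.ofList xs).contains x = true := List.contains_iff_mem.mpr hx
      have : PySem.Set.add (PySem.Set.ofList xs) x = PySem.Set.ofList xs := by
        show (if (PySem.Set.ofList xs).contains x then PySem.Set.ofList xs
          else PySem.Set.ofList xs ++ [x]) = PySem.Set.ofList xs
        rw [if_pos hc]
      rw [this]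
      exact ih.imp_of_mem htrans
    · have hxx : ¬ x ∈ xs := fun hmem => hx ((PySem.Set.mem_ofList xs x).mpr hmem)
      have hc : ¬ (PySem.Set.ofList xs).contains x = true := fun hc =>
        hx (List.contains_iff_mem.mp hc)
      have : PySem.Set.add (PySem.Set.ofList xs) x = PySem.Set.ofList xs ++ [x] := by
        show (if (PySem.Set.ofList xs).contains x then PySem.Set.ofList xs
          else PySem.Set.ofList xs ++ [x]) = PySem.Set.ofList xs ++ [x]
        rw [if_neg hc]
      rw [this]
      rw [List.pairwise_append]
      refine ⟨ih.imp_of_mem htrans, by simp, ?_⟩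
      intro a ha b hb
      rw [List.mem_singleton] at hb
      rw [hb]
      have hax : a ∈ xs := (PySem.Set.mem_ofList xs a).mp ha
      rw [List.idxOf_append_of_mem hax, List.idxOf_append]
      simp only [hxx, if_false]
      have hlt : xs.idxOf a < xs.length := List.idxOf_lt_length_of_mem hax
      have h0 : List.idxOf x [x] = 0 := List.idxOf_cons_self
      omega

-- ===== VERDICT (by name: the statement is the Claim_ definition above) =====
theorem create_protein_dict_spec : Claim_equal_create_protein_dict := by
  intro lines _ hpre
  unfold Spec_create_protein_dict
  have hinv0 : pvInv PySem.Dict.empty ([] : List String) := rfl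
  set dG := (lines.foldl pvGhost (PySem.Dict.empty, [])).1 with hdG
  set rG := (lines.foldl pvGhost (PySem.Dict.empty, [])).2 with hrG
  have hinvF : pvInv dG rG := pvInvFold lines PySem.Dict.empty [] hinv0
  set stream := lines.flatMap (fun pair => pair) with hstream
  have hr : rG = PySem.Set.ofList stream := by
    rw [PySem.Set.ofList_eq_foldl]
    exact pvGhostSnd lines hpre PySem.Dict.empty [] hinv0
  -- A's value is (edges through the ghost dict, ghost list)
  have hA : create_protein_dict lines = (lines.map (pvMapEdge dG), rG) := by
    unfold create_protein_dict
    have h1 : ((PySem.Dict.empty : PySem.Dict String Int), (1 : Int), ([] : List (List Int)))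
        = (PySem.Dict.empty, ((([] : List String).length : Int) + 1), ([] : List (List Int))) := by
      norm_num
    rw [h1, pvMain lines hpre PySem.Dict.empty [] [] hinv0]
    have hmk : (lines.foldl pvGhost (PySem.Dict.empty, []))
        = ((lines.foldl pvGhost (PySem.Dict.empty, [])).1, (lines.foldl pvGhost (PySem.Dict.empty, [])).2) := rfl
    rw [hmk]
    show (([] : List (List Int)) ++ lines.map (pvMapEdge dG),
        dG.items.foldl (fun r p => PySem.List.pySetD r (p.2 - 1) p.1)
          (List.replicate dG.size "")) = (lines.map (pvMapEdge dG), rG)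
    have hsize : dG.size = rG.length := by
      have h : dG.size = dG.items.length := rfl
      rw [h, hinvF]
      simp [PySem.List.length_enumerate]
    rw [hinvF, hsize]
    have hplace := pvPlace rG 0 (List.replicate rG.length "") (by simp)
    norm_num at hplace
    rw [hplace]
    simp
  -- B's value is the same pair
  have hB : create_protein_dict_alt lines = (lines.map (pvMapEdge dG), rG) := by
    simp only [create_protein_dict_alt, ← hstream]
    set fp := ((PySem.List.enumerate stream).reverse).foldl
        (fun d q => d.insert q.2 q.1) (PySem.Dict.empty : PySem.Dict String Int) with hfp
    have hnodupk : fp.keys.Nodup := by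
      rw [hfp]
      exact PySem.Dict.nodup_keys_foldl_insert_key _ (fun q : Int × String => q.2)
        (fun _ q => q.1) _ PySem.Dict.nodup_keys_empty
    have hsorted : PySem.List.sorted fp.keys (fun p => fp.getD p 0) = rG := by
      apply PySem.List.sorted_eq_of_perm_of_pairwise_lt
      · rw [hr]
        rw [List.perm_ext_iff_of_nodup (PySem.Set.nodup_ofList stream) hnodupk]
        intro a
        rw [PySem.Set.mem_ofList, hfp, pvFPmem]
      · rw [hr]
        refine (pvPairwiseIdx stream).imp_of_mem ?_
        intro a b ha hb hlt
        have hga : fp.getD a 0 = (stream.idxOf a : Int) := by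
          have h1 : fp.getD a 0 = (fp.get? a).getD 0 := rfl
          rw [h1, hfp, pvFPget stream 0 a]
          simp [(PySem.Set.mem_ofList stream a).mp ha]
        have hgb : fp.getD b 0 = (stream.idxOf b : Int) := by
          have h1 : fp.getD b 0 = (fp.get? b).getD 0 := rfl
          rw [h1, hfp, pvFPget stream 0 b]
          simp [(PySem.Set.mem_ofList stream b).mp hb]
        simp only [hga, hgb]
        exact_mod_cast hlt
    rw [hsorted]
    have hdgi : dG.items = (PySem.List.enumerate rG 1).map (fun q => (q.2, q.1)) := hinvF
    have hpid : (PySem.List.enumerate rG 1).foldl (fun d q => d.insert q.2 q.1)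
        (PySem.Dict.empty : PySem.Dict String Int) = dG := by
      apply PySem.Dict.ext
      have hnd : ((PySem.List.enumerate rG 1).map (fun q : Int × String => q.2)).Nodup := by
        rw [show (PySem.List.enumerate rG 1).map (fun q : Int × String => q.2) = rG from
          PySem.List.map_snd_enumerate rG 1, hr]
        exact PySem.Set.nodup_ofList stream
      have h := PySem.Dict.items_foldl_insert_fresh (PySem.List.enumerate rG 1)
        (fun q : Int × String => q.2) (fun q : Int × String => q.1) PySem.Dict.empty
        (fun a _ => PySem.Dict.contains_empty _) hnd
      exact h.trans (by rw [hdgi]; rfl)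
    rw [hpid]
  rw [hA, hB]
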